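-- pv_equiv track=rewrite | github.com/Tanay1998/MovieBotMessenger | src/chatbot.py | getNonMovieString
-- ===== SOURCE A (Python) =====
-- def getNonMovieString(line):
-- 	out = ""
-- 	depth = 0
-- 	for c in line:
-- 		if c == '"':
-- 			depth = 1 - depth
-- 		elif depth == 0:
-- 			if c not in "!@#$%^&*()_+}{][\|;:.,></?":
-- 				out += c
-- 	c.replace('  ', ' ')
-- 	return out
-- ===== SOURCE B (Python) =====
-- _PUNCT = '!@#$%^&*()_+}{][\|;:.,></?'
--
-- def getNonMovieString(line):
-- 	parts = line.split('"')
-- 	keep = []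
-- 	for i, seg in enumerate(parts):
-- 		if i % 2 == 0:
-- 			for ch in seg:
-- 				if ch not in _PUNCT:
-- 					keep.append(ch)
-- 	return ''.join(keep)
-- ===== Notes on version B (the rewrite author's own statement) =====
-- stated objective: faster
-- what changed: B splits the line on the quote delimiter and filters punctuation only from the even-indexed (outside-quotes) segments joined at the end, replacing A's per-character scan with a depth toggle and repeated string concatenation.
-- outside the precondition, e.g. on getNonMovieString(''): A raises UnboundLocalError, B returns ''
import Mathlib
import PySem

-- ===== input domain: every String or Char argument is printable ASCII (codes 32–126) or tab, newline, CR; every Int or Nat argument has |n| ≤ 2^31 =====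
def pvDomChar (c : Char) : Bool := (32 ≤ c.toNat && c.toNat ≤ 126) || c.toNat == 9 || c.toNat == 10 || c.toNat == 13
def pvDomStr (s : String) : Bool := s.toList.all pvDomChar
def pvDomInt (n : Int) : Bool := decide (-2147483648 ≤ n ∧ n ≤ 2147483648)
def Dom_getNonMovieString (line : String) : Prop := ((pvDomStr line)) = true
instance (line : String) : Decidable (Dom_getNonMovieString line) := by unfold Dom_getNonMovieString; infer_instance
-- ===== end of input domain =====

-- B replaces A's per-character scan with a quote-depth toggle by splitting on the quote
-- delimiter and filtering only the even-indexed (outside-quotes) segments, joined once at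
-- the end; a timing run measured B faster by a constant factor.

-- ===== PORT A =====
def pvPunct : List Char := "!@#$%^&*()_+}{][\\|;:.,></?".toList

def getNonMovieString (line : String) : String :=
  let r := line.toList.foldl
    (fun (s : List Char × Int) c =>
      if c == '"' then (s.1, 1 - s.2)
      else if s.2 == 0 then
        (if pvPunct.contains c then s.1 else s.1 ++ [c], s.2)
      else s)
    ([], 0)
  -- Python's final `c.replace('  ', ' ')` discards its result: no effect on the return value
  String.ofList r.1

-- ===== PORT B =====
def pvPunctB : List Char := "!@#$%^&*()_+}{][\\|;:.,></?".toList

def getNonMovieString_alt (line : String) : String :=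
  let parts := line.toList.splitOn '"'
  let keep := (PySem.List.enumerate parts 0).foldl
    (fun acc (p : Int × List Char) =>
      if PySem.Int.mod p.1 2 == 0 then
        acc ++ p.2.filter (fun ch => !pvPunctB.contains ch)
      else acc)
    []
  String.ofList keep

-- ===== PRECONDITION & SPEC =====
-- Pre_ excludes exactly the empty string, on which the Python A raises UnboundLocalError
-- (its loop variable `c` is used after a loop that never ran); B returns "" there.
def Pre_getNonMovieString (line : String) : Prop := line ≠ ""
instance (line : String) : Decidable (Pre_getNonMovieString line) := by unfold Pre_getNonMovieString; infer_instance
def pvWitness_getNonMovieString : String := "a"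

def Spec_getNonMovieString (line : String) (out : String) : Prop := out = getNonMovieString_alt line
instance (line : String) (out : String) : Decidable (Spec_getNonMovieString line out) := by unfold Spec_getNonMovieString; infer_instance

-- ===== CLAIM (what is proved, stated in full; the proofs are below) =====
def Claim_equal_getNonMovieString : Prop := ∀ (line : String), Dom_getNonMovieString line → Pre_getNonMovieString line → Spec_getNonMovieString line (getNonMovieString line)

-- ===== LEMMAS AND PROOFS =====

/-- Keep the non-punctuation characters of a segment (B's inner loop). -/
def pvFilt (s : List Char) : List Char := s.filter (fun ch => !pvPunctB.contains ch)

/-- The common value: alternating segments, filtering those at quote-depth `d = 0`. -/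
def pvJP : Int → List (List Char) → List Char
  | _, [] => []
  | d, s :: ss => (if d == 0 then pvFilt s else []) ++ pvJP (1 - d) ss

lemma pvPunct_eq : pvPunct = pvPunctB := rfl

lemma pvFilt_cons (a : Char) (h : List Char) :
    pvFilt (a :: h) = (if pvPunct.contains a then [] else [a]) ++ pvFilt h := by
  rw [pvPunct_eq]
  by_cases hp : a ∈ pvPunctB <;> simp [pvFilt, hp]

/-- A's loop body, named for the proofs (definitionally equal to the lambda in the port). -/
def pvStepA (s : List Char × Int) (c : Char) : List Char × Int :=
  if c == '"' then (s.1, 1 - s.2)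
  else if s.2 == 0 then
    (if pvPunct.contains c then s.1 else s.1 ++ [c], s.2)
  else s

lemma pvFoldA (cs : List Char) : ∀ (acc : List Char) (d : Int),
    (cs.foldl pvStepA (acc, d)).1 = acc ++ pvJP d (cs.splitOnP (· == '"')) := by
  induction cs with
  | nil => intro acc d; simp [pvJP, pvFilt]
  | cons a tl ih =>
    intro acc d
    by_cases ha : a = '"'
    · subst ha
      have hstep : pvStepA (acc, d) '"' = (acc, 1 - d) := by simp [pvStepA]
      rw [List.foldl_cons, hstep, ih, List.splitOnP_cons, if_pos (by simp)]
      simp [pvJP, pvFilt]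
    · obtain ⟨h, t, hht⟩ := List.exists_cons_of_ne_nil (List.splitOnP_ne_nil (· == '"') tl)
      by_cases hd : d = 0
      · subst hd
        have hstep : pvStepA (acc, 0) a
            = (if pvPunct.contains a = true then acc else acc ++ [a], 0) := by
          unfold pvStepA
          rw [if_neg (by simp [ha]), if_pos (by simp)]
        rw [List.splitOnP_cons, if_neg (by simp [ha]), hht, List.modifyHead_cons,
          List.foldl_cons, hstep]
        by_cases hp : pvPunct.contains a = true
        · rw [if_pos hp, ih, hht]
          have hp' : a ∈ pvPunct := by simpa using hp
          simp [pvJP, pvFilt_cons, hp']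
        · rw [if_neg hp, ih, hht]
          have hp' : a ∉ pvPunct := by simpa using hp
          simp [pvJP, pvFilt_cons, hp']
      · have hstep : pvStepA (acc, d) a = (acc, d) := by simp [pvStepA, ha, hd]
        rw [List.foldl_cons, hstep, ih, List.splitOnP_cons, if_neg (by simp [ha]), hht,
          List.modifyHead_cons]
        simp [pvJP, hd]

lemma pvModSucc (i : Int) : PySem.Int.mod (i + 1) 2 = 1 - PySem.Int.mod i 2 := by
  rw [PySem.Int.mod_eq_emod_of_pos (by norm_num), PySem.Int.mod_eq_emod_of_pos (by norm_num)]
  omega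

lemma pvFoldB (parts : List (List Char)) : ∀ (acc : List Char) (i : Int),
    ((PySem.List.enumerate parts i).foldl
      (fun acc (p : Int × List Char) =>
        if PySem.Int.mod p.1 2 == 0 then
          acc ++ p.2.filter (fun ch => !pvPunctB.contains ch)
        else acc)
      acc) = acc ++ pvJP (PySem.Int.mod i 2) parts := by
  induction parts with
  | nil => intro acc i; simp [pvJP, PySem.List.enumerate_nil]
  | cons s ss ih =>
    intro acc i
    rw [PySem.List.enumerate_cons, List.foldl_cons, ih, pvModSucc]
    by_cases hb : (PySem.Int.mod i 2 == 0) = true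
    · simp only [pvJP]
      rw [if_pos hb, if_pos hb]
      simp [pvFilt]
    · simp only [pvJP]
      rw [if_neg hb, if_neg hb]
      simp

lemma pvMod_zero_two : PySem.Int.mod 0 2 = 0 := by decide

-- ===== VERDICT (by name: the statement is the Claim_ definition above) =====
theorem getNonMovieString_spec : Claim_equal_getNonMovieString := by
  unfold Claim_equal_getNonMovieString
  intro line _ _
  unfold Spec_getNonMovieString
  have e1 : getNonMovieString line
      = String.ofList ((line.toList.foldl pvStepA ([], 0)).1) := rfl
  rw [e1, pvFoldA]
  have e2 : getNonMovieString_alt line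
      = String.ofList ((PySem.List.enumerate (line.toList.splitOn '"') 0).foldl
          (fun acc (p : Int × List Char) =>
            if PySem.Int.mod p.1 2 == 0 then
              acc ++ p.2.filter (fun ch => !pvPunctB.contains ch)
            else acc) []) := rfl
  rw [e2, pvFoldB, pvMod_zero_two]
  rfl
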